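-- pv_equiv track=rewrite | github.com/aj45gh/box_move | box_move.py | split_piles
-- ===== SOURCE A (Python) =====
-- def split_piles(boxes: int, carry_limit: int, parts: int):
--     # Start by splitting piles into equal parts via division
--     piles = [int(boxes / parts)] * parts
--
--     # Add one to a pile for each remainder
--     for i in range(boxes % parts):
--         piles[i] += 1
--
--     final_piles = []
--
--     for pile in piles:
--         # If pile is above carry limit, split it again
--         if pile > carry_limit:
--             final_piles.extend(split_piles(pile, carry_limit, parts))
--
--         else:
--             final_piles.append(pile)
--
--     return final_piles
-- ===== SOURCE B (Python) =====
-- def split_piles(boxes, carry_limit, parts):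
--     # Iterative version: an explicit LIFO stack of pending piles replaces the recursion.
--     def split_once(n):
--         share, extra = int(n / parts), n % parts
--         return [share + 1] * extra + [share] * (parts - extra)
--
--     out = []
--     stack = split_once(boxes)[::-1]
--     while stack:
--         pile = stack.pop()
--         if pile <= carry_limit:
--             out.append(pile)
--         else:
--             stack.extend(split_once(pile)[::-1])
--     return out
-- ===== Notes on version B (the rewrite author's own statement) =====
-- stated objective: alternative
-- what changed: The recursion is replaced by an iterative DFS: an explicit LIFO stack of pending piles, seeded with the first split pushed in reverse, popping a pile and either emitting it or pushing its own split; Pre_ excludes exactly the inputs where A does not return (parts = 0 raises ZeroDivisionError, parts = 1 with boxes > carry_limit raises RecursionError, and parts >= 2 with carry_limit <= 0 diverges unless every pile of the first split is already within the limit).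
import Mathlib
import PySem

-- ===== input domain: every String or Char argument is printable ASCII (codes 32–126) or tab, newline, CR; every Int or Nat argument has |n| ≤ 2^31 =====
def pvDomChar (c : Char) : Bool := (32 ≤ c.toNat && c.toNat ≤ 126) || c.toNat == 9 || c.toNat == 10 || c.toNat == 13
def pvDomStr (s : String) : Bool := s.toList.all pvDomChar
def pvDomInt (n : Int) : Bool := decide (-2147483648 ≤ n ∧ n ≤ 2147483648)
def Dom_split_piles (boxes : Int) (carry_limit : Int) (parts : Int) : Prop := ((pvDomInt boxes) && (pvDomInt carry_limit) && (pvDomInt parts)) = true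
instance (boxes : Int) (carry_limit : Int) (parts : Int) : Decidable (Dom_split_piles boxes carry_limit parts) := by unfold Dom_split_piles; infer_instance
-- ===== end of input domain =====

-- B replaces A's recursion by an explicit LIFO stack of pending piles (iterative DFS, same order and values); objective: alternative decomposition, same cost.

-- ===== PORT A =====
-- piles = [int(boxes / parts)] * parts; for i in range(boxes % parts): piles[i] += 1
-- (int(boxes/parts) is exact truncating division on |n| ≤ 2^31: PySem.Int.truncdiv;
--  the i of range(boxes % parts) is always in bounds, so piles[i] += 1 is ported with getD/set)
def buildPiles (boxes : Int) (parts : Int) : List Int :=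
  (PySem.List.pyRange 0 (PySem.Int.mod boxes parts) 1).foldl
    (fun l i => l.set i.toNat (l.getD i.toNat 0 + 1))
    (List.replicate parts.toNat (PySem.Int.truncdiv boxes parts))

-- the recursion, with a fuel counter as totality guard (boxes.toNat + 1 is enough on Pre_, proved below)
def splitA : Nat → Int → Int → Int → List Int
  | 0, _, _, _ => []
  | f+1, boxes, carry_limit, parts =>
    (buildPiles boxes parts).foldl
      (fun acc pile =>
        if pile > carry_limit then acc ++ splitA f pile carry_limit parts
        else acc ++ [pile]) []

def split_piles (boxes : Int) (carry_limit : Int) (parts : Int) : List Int :=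
  splitA (boxes.toNat + 1) boxes carry_limit parts

-- ===== PORT B =====
-- [share + 1] * extra + [share] * (parts - extra)
def splitOnce (n : Int) (parts : Int) : List Int :=
  List.replicate (PySem.Int.mod n parts).toNat (PySem.Int.truncdiv n parts + 1)
    ++ List.replicate (parts - PySem.Int.mod n parts).toNat (PySem.Int.truncdiv n parts)

-- fuel budget of one stack entry (totality guard for the while loop; adequate on Pre_, proved below)
def pileFuel (carry_limit : Int) (parts : Int) (p : Int) : Nat :=
  if p ≤ carry_limit then 1 else (parts.toNat + 1) * p.toNat - 1

-- while stack: pop from the end, append or push split children reversed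
def bLoop (carry_limit : Int) (parts : Int) : Nat → List Int → List Int → List Int
  | 0, _, out => out
  | f+1, stack, out =>
    match stack.getLast? with
    | none => out
    | some pile =>
      if pile ≤ carry_limit then
        bLoop carry_limit parts f stack.dropLast (out ++ [pile])
      else
        bLoop carry_limit parts f (stack.dropLast ++ (splitOnce pile parts).reverse) out

def split_piles_alt (boxes : Int) (carry_limit : Int) (parts : Int) : List Int :=
  bLoop carry_limit parts
    ((((splitOnce boxes parts).reverse).map (pileFuel carry_limit parts)).sum)
    ((splitOnce boxes parts).reverse) []

-- ===== PRECONDITION & SPEC =====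
-- Pre_ holds exactly where the Python A returns: parts = 0 raises ZeroDivisionError; parts = 1 with
-- boxes > carry_limit raises RecursionError; for parts ≥ 2 with carry_limit ≤ 0 A diverges unless
-- already every pile of the first split is within the limit (the last disjunct).
def Pre_split_piles (boxes : Int) (carry_limit : Int) (parts : Int) : Prop :=
  parts < 0 ∨ (parts = 1 ∧ boxes ≤ carry_limit) ∨
  (2 ≤ parts ∧ (1 ≤ carry_limit ∨
    PySem.Int.truncdiv boxes parts
      + (if 0 < PySem.Int.mod boxes parts then 1 else 0) ≤ carry_limit))

instance (boxes : Int) (carry_limit : Int) (parts : Int) : Decidable (Pre_split_piles boxes carry_limit parts) := by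
  unfold Pre_split_piles; infer_instance

def pvWitness_split_piles : Int × Int × Int := (17, 3, 2)

def Spec_split_piles (boxes : Int) (carry_limit : Int) (parts : Int) (out : List Int) : Prop :=
  out = split_piles_alt boxes carry_limit parts

instance (boxes : Int) (carry_limit : Int) (parts : Int) (out : List Int) : Decidable (Spec_split_piles boxes carry_limit parts out) := by
  unfold Spec_split_piles; infer_instance

-- ===== CLAIM (what is proved, stated in full; the proofs are below) =====
def Claim_equal_split_piles : Prop := ∀ (boxes : Int) (carry_limit : Int) (parts : Int), Dom_split_piles boxes carry_limit parts → Pre_split_piles boxes carry_limit parts → Spec_split_piles boxes carry_limit parts (split_piles boxes carry_limit parts)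

-- ===== LEMMAS AND PROOFS =====

theorem setIncr (q : Int) : ∀ (k n : Nat), k ≤ n →
    (List.range k).foldl (fun l i => l.set i (l.getD i 0 + 1)) (List.replicate n q)
      = List.replicate k (q + 1) ++ List.replicate (n - k) q := by
  intro k
  induction k with
  | zero => simp
  | succ k ih =>
    intro n hk
    rw [List.range_succ, List.foldl_append, ih n (by omega)]
    simp only [List.foldl_cons, List.foldl_nil]
    rw [List.getD_append_right _ _ _ _ (by simp), List.set_append]
    simp only [List.length_replicate, Nat.sub_self, lt_irrefl]
    have hnk : n - k = (n - (k+1)) + 1 := by omega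
    rw [hnk, List.replicate_succ]
    simp [List.replicate_succ' (n := k), List.append_assoc]

theorem buildPiles_eq (b parts : Int) (hp : parts ≠ 0) :
    buildPiles b parts = splitOnce b parts := by
  rcases lt_or_gt_of_ne hp with hneg | hpos
  · obtain ⟨h1, h2⟩ := PySem.Int.mod_neg_bounds b hneg
    unfold buildPiles splitOnce
    rw [PySem.List.pyRange_one_eq_nil (by omega)]
    simp only [List.foldl_nil]
    have : parts.toNat = 0 := by omega
    rw [this]
    have : (PySem.Int.mod b parts).toNat = 0 := by omega
    rw [this]
    have : (parts - PySem.Int.mod b parts).toNat = 0 := by omega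
    rw [this]
    simp
  · have h0 : 0 ≤ PySem.Int.mod b parts := PySem.Int.mod_nonneg b hpos
    have h1 : PySem.Int.mod b parts < parts := PySem.Int.mod_lt b hpos
    unfold buildPiles splitOnce
    rw [PySem.List.pyRange_one, List.foldl_map]
    have hz : ∀ (k : Nat), ((0 : Int) + k).toNat = k := by intro k; omega
    simp only [hz, PySem.Int.mod, PySem.Int.truncdiv] at *
    have hsub : (PySem.Int.mod b parts - 0).toNat = (PySem.Int.mod b parts).toNat := by
      simp [PySem.Int.mod]
    simp only [PySem.Int.mod] at hsub
    rw [hsub, setIncr _ _ _ (by omega)]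
    congr 1
    congr 1
    omega

theorem mem_splitOnce (b parts p : Int) (hp : 0 < parts) (hmem : p ∈ splitOnce b parts) :
    p = PySem.Int.truncdiv b parts ∨
      (p = PySem.Int.truncdiv b parts + 1 ∧ 0 < PySem.Int.mod b parts) := by
  have h0 : 0 ≤ PySem.Int.mod b parts := PySem.Int.mod_nonneg b hp
  unfold splitOnce at hmem
  rcases List.mem_append.1 hmem with h | h
  · right
    rcases List.eq_of_mem_replicate h with rfl
    have : (PySem.Int.mod b parts).toNat ≠ 0 := by
      intro h0'; rw [h0'] at h; simp at h
    exact ⟨rfl, by omega⟩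
  · left; exact List.eq_of_mem_replicate h

theorem tdiv_nonpos' (b parts : Int) (hb : b ≤ 0) (hp : 0 < parts) :
    PySem.Int.truncdiv b parts ≤ 0 := by
  unfold PySem.Int.truncdiv
  have : b = -(-b) := by ring
  rw [this, Int.neg_tdiv]
  have := Int.tdiv_nonneg (a := -b) (b := parts) (by omega) (by omega)
  omega

theorem decomp (b parts : Int) (hb : 0 ≤ b) (hp : 0 < parts) :
    parts * PySem.Int.truncdiv b parts + PySem.Int.mod b parts = b ∧
      0 ≤ PySem.Int.truncdiv b parts ∧ 0 ≤ PySem.Int.mod b parts ∧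
      PySem.Int.mod b parts < parts := by
  refine ⟨?_, ?_, PySem.Int.mod_nonneg b hp, PySem.Int.mod_lt b hp⟩
  · rw [PySem.Int.mod_eq_emod_of_pos hp]
    unfold PySem.Int.truncdiv
    rw [Int.tdiv_eq_ediv_of_nonneg hb]
    exact Int.mul_ediv_add_emod b parts
  · exact Int.tdiv_nonneg hb (by omega)

theorem small_no_child (b parts p : Int) (hp : 2 ≤ parts) (hb : b ≤ 1)
    (hmem : p ∈ splitOnce b parts) : p ≤ 1 := by
  have hq : PySem.Int.truncdiv b parts ≤ 0 := by
    rcases (by omega : b ≤ 0 ∨ 0 < b) with h | h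
    · exact tdiv_nonpos' b parts h (by omega)
    · have hb1 : b = 1 := by omega
      unfold PySem.Int.truncdiv
      rw [hb1, Int.tdiv_eq_zero_of_lt (by omega) (by omega)]
  rcases mem_splitOnce b parts p (by omega) hmem with h | ⟨h, _⟩ <;> omega
def sfun (c parts b : Int) : List Int := splitA (b.toNat + 1) b c parts
def gfun (c parts p : Int) : List Int := if c < p then sfun c parts p else [p]

theorem child_lt (c b parts p : Int) (hc : 1 ≤ c) (hp : 2 ≤ parts)
    (hmem : p ∈ splitOnce b parts) (hcp : c < p) : p.toNat < b.toNat := by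
  have hb : 0 ≤ b := by
    by_contra h
    have := small_no_child b parts p hp (by omega) hmem
    omega
  obtain ⟨hsum, hq, hr0, hrlt⟩ := decomp b parts hb (by omega)
  have hmul : 2 * PySem.Int.truncdiv b parts ≤ parts * PySem.Int.truncdiv b parts :=
    mul_le_mul_of_nonneg_right hp hq
  rcases mem_splitOnce b parts p (by omega) hmem with h | ⟨h, hr⟩ <;> omega

theorem splitA_unfold (f : Nat) (b c parts : Int) :
    splitA (f + 1) b c parts
      = (buildPiles b parts).flatMap (fun p => if c < p then splitA f p c parts else [p]) := by
  show (buildPiles b parts).foldl _ [] = _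
  have hfun : (fun (acc : List Int) pile =>
        if pile > c then acc ++ splitA f pile c parts else acc ++ [pile])
      = (fun acc pile => acc ++ if c < pile then splitA f pile c parts else [pile]) := by
    funext acc pile
    by_cases h : c < pile <;> simp [h]
  rw [hfun, PySem.List.foldl_append_eq_flatMap]
  simp

theorem stabA (c parts : Int) (hc : 1 ≤ c) (hp : 2 ≤ parts) : ∀ (k : Nat) (b : Int) (f g : Nat),
    b.toNat ≤ k → b.toNat < f → b.toNat < g → splitA f b c parts = splitA g b c parts := by
  intro k
  induction k with
  | zero =>
    intro b f g hk hf hg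
    obtain ⟨f', rfl⟩ : ∃ f', f = f' + 1 := ⟨f - 1, by omega⟩
    obtain ⟨g', rfl⟩ : ∃ g', g = g' + 1 := ⟨g - 1, by omega⟩
    rw [splitA_unfold, splitA_unfold]
    apply List.flatMap_congr
    intro p hmem
    rw [buildPiles_eq b parts (by omega)] at hmem
    have := small_no_child b parts p hp (by omega) hmem
    rw [if_neg (by omega), if_neg (by omega)]
  | succ k ih =>
    intro b f g hk hf hg
    obtain ⟨f', rfl⟩ : ∃ f', f = f' + 1 := ⟨f - 1, by omega⟩
    obtain ⟨g', rfl⟩ : ∃ g', g = g' + 1 := ⟨g - 1, by omega⟩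
    rw [splitA_unfold, splitA_unfold]
    apply List.flatMap_congr
    intro p hmem
    rw [buildPiles_eq b parts (by omega)] at hmem
    by_cases hcp : c < p
    · rw [if_pos hcp, if_pos hcp]
      have hlt := child_lt c b parts p hc hp hmem hcp
      exact ih p f' g' (by omega) (by omega) (by omega)
    · rw [if_neg hcp, if_neg hcp]

theorem sfun_unfold (c parts b : Int) (hc : 1 ≤ c) (hp : 2 ≤ parts) :
    sfun c parts b = (splitOnce b parts).flatMap (gfun c parts) := by
  unfold sfun
  rw [splitA_unfold, buildPiles_eq b parts (by omega)]
  apply List.flatMap_congr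
  intro p hmem
  unfold gfun
  by_cases hcp : c < p
  · rw [if_pos hcp, if_pos hcp]
    have hlt := child_lt c b parts p hc hp hmem hcp
    exact stabA c parts hc hp b.toNat p b.toNat (p.toNat + 1) (by omega) (by omega) (by omega)
  · rw [if_neg hcp, if_neg hcp]

theorem F_pos (c parts p : Int) (hc : 1 ≤ c) : 1 ≤ pileFuel c parts p := by
  unfold pileFuel
  by_cases h : p ≤ c
  · simp [h]
  · rw [if_neg h]
    have : 2 ≤ p.toNat := by omega
    have : 1 * 2 ≤ (parts.toNat + 1) * p.toNat :=
      Nat.mul_le_mul (by omega) this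
    omega
set_option maxHeartbeats 1000000 in
theorem budget (c parts p : Int) (hc : 1 ≤ c) (hp : 2 ≤ parts) (hcp : c < p) :
    ((splitOnce p parts).map (pileFuel c parts)).sum + 1 ≤ pileFuel c parts p := by
  have hb : 0 ≤ p := by omega
  obtain ⟨hsum, hq, hr0, hrlt⟩ := decomp p parts hb (by omega)
  set q := PySem.Int.truncdiv p parts with hqdef
  set r := PySem.Int.mod p parts with hrdef
  unfold splitOnce
  rw [List.map_append, List.map_replicate, List.map_replicate, List.sum_append,
    List.sum_replicate, List.sum_replicate, smul_eq_mul, smul_eq_mul]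
  have hFp : pileFuel c parts p = (parts.toNat + 1) * p.toNat - 1 := by
    unfold pileFuel; rw [if_neg (by omega)]
  rw [hFp]
  have hPp : (p.toNat : Int) = p := Int.toNat_of_nonneg hb
  have hQ : (q.toNat : Int) = q := Int.toNat_of_nonneg hq
  have hR : (r.toNat : Int) = r := Int.toNat_of_nonneg hr0
  have hPa : (parts.toNat : Int) = parts := Int.toNat_of_nonneg (by omega)
  have hPR : ((parts - r).toNat : Int) = parts - r := Int.toNat_of_nonneg (by omega)
  have h2 : 2 ≤ p.toNat := by omega
  by_cases h1 : q + 1 ≤ c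
  · have hF1 : pileFuel c parts (q + 1) = 1 := by unfold pileFuel; rw [if_pos (by omega)]
    have hF2 : pileFuel c parts q = 1 := by unfold pileFuel; rw [if_pos (by omega)]
    rw [hF1, hF2]
    have : (parts.toNat + 1) * 2 ≤ (parts.toNat + 1) * p.toNat := Nat.mul_le_mul_left _ h2
    omega
  · by_cases h0 : q ≤ c
    · -- q = c, the q+1 children are internal, the q children leaves
      have hqc : q = c := by omega
      have hq1 : 1 ≤ q := by omega
      have hF1 : pileFuel c parts (q + 1) = (parts.toNat + 1) * (q + 1).toNat - 1 := by
        unfold pileFuel; rw [if_neg (by omega)]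
      have hF2 : pileFuel c parts q = 1 := by unfold pileFuel; rw [if_pos (by omega)]
      rw [hF1, hF2]
      have hQ1 : ((q + 1).toNat : Int) = q + 1 := Int.toNat_of_nonneg (by omega)
      have hgeq : 1 ≤ (parts.toNat + 1) * (q + 1).toNat := by
        have := Nat.mul_le_mul (show 1 ≤ parts.toNat + 1 by omega) (show 1 ≤ (q+1).toNat by omega)
        omega
      zify [hgeq, (show 1 ≤ (parts.toNat + 1) * p.toNat by nlinarith)]
      rw [hPp, hQ1, hR, hPa, hPR]
      rcases (show r = 0 ∨ 1 ≤ r by omega) with hr | hr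
      · rw [hr] at hsum ⊢
        nlinarith [mul_le_mul (show parts + 2 ≤ parts * (parts + 1) by nlinarith)
          (le_refl (1:Int)) (by norm_num) (by nlinarith : (0:Int) ≤ parts * (parts + 1)),
          mul_le_mul (le_refl (parts * (parts + 1))) hq1 (by norm_num)
            (by nlinarith : (0:Int) ≤ parts * (parts + 1))]
      · nlinarith [mul_le_mul (le_refl (parts + 1)) (show 1 ≤ q * (parts - r) by nlinarith)
          (by norm_num) (show (0:Int) ≤ parts + 1 by omega)]
    · -- both child values are internal
      have hq1 : 1 ≤ q := by omega
      have hF1 : pileFuel c parts (q + 1) = (parts.toNat + 1) * (q + 1).toNat - 1 := by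
        unfold pileFuel; rw [if_neg (by omega)]
      have hF2 : pileFuel c parts q = (parts.toNat + 1) * q.toNat - 1 := by
        unfold pileFuel; rw [if_neg (by omega)]
      rw [hF1, hF2]
      have hQ1 : ((q + 1).toNat : Int) = q + 1 := Int.toNat_of_nonneg (by omega)
      have hgeq1 : 1 ≤ (parts.toNat + 1) * (q + 1).toNat := by
        have := Nat.mul_le_mul (show 1 ≤ parts.toNat + 1 by omega) (show 1 ≤ (q+1).toNat by omega)
        omega
      have hgeq2 : 1 ≤ (parts.toNat + 1) * q.toNat := by
        have := Nat.mul_le_mul (show 1 ≤ parts.toNat + 1 by omega) (show 1 ≤ q.toNat by omega)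
        omega
      zify [hgeq1, hgeq2, (show 1 ≤ (parts.toNat + 1) * p.toNat by nlinarith)]
      rw [hPp, hQ, hQ1, hR, hPa, hPR]
      nlinarith
theorem stackLemma (c parts : Int) (hc : 1 ≤ c) (hp : 2 ≤ parts) : ∀ (f : Nat) (s out : List Int),
    (s.map (pileFuel c parts)).sum ≤ f →
    bLoop c parts f s out = out ++ s.reverse.flatMap (gfun c parts) := by
  intro f
  induction f with
  | zero =>
    intro s out hf
    cases s with
    | nil => simp [bLoop]
    | cons x xs =>
      exfalso
      have := F_pos c parts x hc
      simp only [List.map_cons, List.sum_cons] at hf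
      omega
  | succ f ih =>
    intro s out hf
    rcases List.eq_nil_or_concat s with rfl | ⟨ys, p, rfl⟩
    · simp [bLoop]
    · rw [List.concat_eq_append] at *
      have hsum : ((ys ++ [p]).map (pileFuel c parts)).sum
          = (ys.map (pileFuel c parts)).sum + pileFuel c parts p := by
        simp
      show (match (ys ++ [p]).getLast? with
        | none => out
        | some pile =>
          if pile ≤ c then bLoop c parts f (ys ++ [p]).dropLast (out ++ [pile])
          else bLoop c parts f ((ys ++ [p]).dropLast ++ (splitOnce pile parts).reverse) out) = _
      rw [List.getLast?_concat, List.dropLast_concat]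
      dsimp only
      by_cases hpc : p ≤ c
      · rw [if_pos hpc, ih ys (out ++ [p]) (by have := F_pos c parts p hc; omega)]
        simp [gfun, show ¬ c < p by omega]
      · rw [if_neg hpc]
        have hbud := budget c parts p hc hp (by omega)
        rw [ih (ys ++ (splitOnce p parts).reverse) out (by
          simp only [List.map_append, List.sum_append, List.map_reverse, List.sum_reverse]
          omega)]
        rw [List.reverse_append, List.reverse_reverse, List.reverse_append,
          List.reverse_singleton, List.flatMap_append]
        have hg : gfun c parts p = (splitOnce p parts).flatMap (gfun c parts) := by
          unfold gfun
          rw [if_pos (by omega)]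
          exact sfun_unfold c parts p hc hp
        simp [hg]
theorem leafLoop (c parts : Int) : ∀ (f : Nat) (s out : List Int),
    (∀ p ∈ s, p ≤ c) → s.length ≤ f → bLoop c parts f s out = out ++ s.reverse := by
  intro f
  induction f with
  | zero =>
    intro s out hall hf
    obtain rfl : s = [] := List.length_eq_zero_iff.1 (by omega)
    simp [bLoop]
  | succ f ih =>
    intro s out hall hf
    rcases List.eq_nil_or_concat s with rfl | ⟨ys, p, rfl⟩
    · simp [bLoop]
    · rw [List.concat_eq_append] at *
      show (match (ys ++ [p]).getLast? with
        | none => out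
        | some pile =>
          if pile ≤ c then bLoop c parts f (ys ++ [p]).dropLast (out ++ [pile])
          else bLoop c parts f ((ys ++ [p]).dropLast ++ (splitOnce pile parts).reverse) out) = _
      rw [List.getLast?_concat, List.dropLast_concat]
      dsimp only
      rw [if_pos (hall p (by simp))]
      rw [ih ys (out ++ [p]) (fun x hx => hall x (by simp [hx])) (by simp at hf ⊢; omega)]
      simp

theorem splitOnce_neg (b parts : Int) (hneg : parts < 0) : splitOnce b parts = [] := by
  obtain ⟨h1, h2⟩ := PySem.Int.mod_neg_bounds b hneg
  unfold splitOnce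
  rw [(show (PySem.Int.mod b parts).toNat = 0 by omega),
    (show (parts - PySem.Int.mod b parts).toNat = 0 by omega)]
  simp

theorem main_thm : ∀ (boxes carry_limit parts : Int),
    Pre_split_piles boxes carry_limit parts →
    split_piles boxes carry_limit parts = split_piles_alt boxes carry_limit parts := by
  intro b c parts hpre
  unfold Pre_split_piles at hpre
  rcases hpre with hneg | ⟨hp1, hbc⟩ | ⟨hp2, hrest⟩
  · -- parts < 0 : both are []
    have hso := splitOnce_neg b parts hneg
    unfold split_piles
    rw [splitA_unfold, buildPiles_eq b parts (by omega), hso]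
    simp [split_piles_alt, hso, bLoop]
  · -- parts = 1, boxes ≤ carry_limit : both are [boxes]
    subst hp1
    have hso : splitOnce b 1 = [b] := by
      unfold splitOnce
      rw [(show PySem.Int.mod b 1 = 0 from Int.fmod_one b)]
      simp [PySem.Int.truncdiv, Int.tdiv_one]
    unfold split_piles
    rw [splitA_unfold, buildPiles_eq b 1 (by omega), hso]
    simp only [List.flatMap_cons, List.flatMap_nil, List.append_nil]
    rw [if_neg (by omega)]
    simp only [split_piles_alt, hso]
    simp [pileFuel, bLoop, hbc]
  · by_cases hc : 1 ≤ c
    · -- the general case: stack machine = recursion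
      have hA : split_piles b c parts = (splitOnce b parts).flatMap (gfun c parts) :=
        sfun_unfold c parts b hc hp2
      rw [hA]
      unfold split_piles_alt
      rw [stackLemma c parts hc hp2 _ _ [] (le_refl _)]
      simp
    · -- carry_limit ≤ 0 but already every pile of the first split is within the limit
      have hmax : PySem.Int.truncdiv b parts
          + (if 0 < PySem.Int.mod b parts then 1 else 0) ≤ c := by tauto
      have hall : ∀ p ∈ splitOnce b parts, p ≤ c := by
        intro p hmem
        rcases mem_splitOnce b parts p (by omega) hmem with h | ⟨h, hr⟩
        · by_cases h0 : 0 < PySem.Int.mod b parts <;> simp [h0] at hmax <;> omega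
        · rw [if_pos hr] at hmax; omega
      have hA : split_piles b c parts = splitOnce b parts := by
        unfold split_piles
        rw [splitA_unfold, buildPiles_eq b parts (by omega)]
        rw [List.flatMap_congr (g := fun p => [p])
          (fun p hmem => by rw [if_neg (by have := hall p hmem; omega)])]
        exact List.flatMap_singleton' _
      have hfuel : (((splitOnce b parts).reverse).map (pileFuel c parts)).sum
          = ((splitOnce b parts).reverse).length := by
        rw [List.map_congr_left (fun p hp => by
          unfold pileFuel
          rw [if_pos (hall p (by simpa using hp))])]
        simp
      unfold split_piles_alt
      rw [hfuel, leafLoop c parts _ _ [] (fun p hp => hall p (by simpa using hp)) (le_refl _)]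
      simp [hA]

-- ===== VERDICT (by name: the statement is the Claim_ definition above) =====
theorem split_piles_spec : Claim_equal_split_piles := by
  intro boxes carry_limit parts _ hpre
  unfold Spec_split_piles
  exact main_thm boxes carry_limit parts hpre
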